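-- pv_equiv track=rewrite | github.com/burgersmoke/MADE-CRF | bioc_evaluation.py | split_annotations
-- ===== SOURCE A (Python) =====
-- def split_annotations(annotation_id,category,offset,annotation_length,text):
--     # Split NER annotations on spaces for approximate/word level match
--     words=[]
--     current_index=-1
--     length=0
--     for idx in range(offset,offset+annotation_length):
--         if current_index == -1:
--             if text[idx]!=' ':
--                 current_index=idx
--                 length+=1
--         elif current_index!=-1:
--             if text[idx]==' ':
--                 words.append((current_index,length))
--                 current_index=-1
--                 length=0
--             else:
--                 length+=1
--     if current_index!=-1:
--         words.append((current_index,length))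
--     return_packet=[(annotation_id+'-'+str(idx),(category,word[0],word[1])) for idx,word in enumerate(words)]
--     return return_packet
-- ===== SOURCE B (Python) =====
-- def split_annotations(annotation_id, category, offset, annotation_length, text):
--     # Extract the covered span (per-index, same indexing as the original),
--     # then tokenize it into maximal runs of non-space characters with a
--     # two-pointer scan instead of a char-by-char sentinel state machine.
--     span = ''.join(text[idx] for idx in range(offset, offset + annotation_length))
--     words = []
--     i = 0
--     n = len(span)
--     while i < n:
--         if span[i] == ' ':
--             i += 1
--         else:
--             j = i
--             while j < n and span[j] != ' ':
--                 j += 1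
--             words.append((offset + i, j - i))
--             i = j
--     return [(annotation_id + '-' + str(idx), (category, word[0], word[1]))
--             for idx, word in enumerate(words)]
-- ===== Notes on version B (the rewrite author's own statement) =====
-- stated objective: alternative
-- what changed: A's single char-by-char state machine with a current_index=-1 sentinel is replaced by extracting the covered span and tokenizing it into maximal non-space runs with a two-pointer scan.
-- outside the precondition, e.g. on split_annotations('a', 'C', -1, 1, 'ab'): A returns [], B returns [('a-0', ('C', -1, 1))]
import Mathlib
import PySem

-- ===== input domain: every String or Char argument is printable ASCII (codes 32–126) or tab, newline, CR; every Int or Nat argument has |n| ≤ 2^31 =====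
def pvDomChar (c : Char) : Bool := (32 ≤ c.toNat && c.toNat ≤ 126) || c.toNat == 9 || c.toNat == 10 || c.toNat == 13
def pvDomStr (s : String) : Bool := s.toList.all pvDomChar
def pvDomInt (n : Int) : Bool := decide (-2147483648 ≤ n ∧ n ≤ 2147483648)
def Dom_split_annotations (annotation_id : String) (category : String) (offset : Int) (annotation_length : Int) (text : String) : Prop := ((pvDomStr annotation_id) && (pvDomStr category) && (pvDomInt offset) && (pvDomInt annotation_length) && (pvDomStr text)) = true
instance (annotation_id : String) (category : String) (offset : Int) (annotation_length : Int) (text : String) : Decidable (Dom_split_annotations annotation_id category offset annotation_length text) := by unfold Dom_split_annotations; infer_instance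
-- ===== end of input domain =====

-- B replaces A's sentinel state machine by span extraction + a two-pointer scan for maximal
-- non-space runs (objective: alternative decomposition, same cost). Equality of RETURN values.

-- ===== PORT A =====
-- text[idx] as a Char; '.getD'-default is never reached under Pre_ (all indices in range there)
def pvChr (text : String) (idx : Int) : Char := (PySem.Str.pyGet? text idx).getD ' '

-- the body of A's 'for idx in range(...)' loop; state = (words, current_index, length)
def pvStepA (text : String) (st : List (Int × Int) × Int × Int) (idx : Int) :
    List (Int × Int) × Int × Int :=
  let c := pvChr text idx
  if st.2.1 = -1 then
    if c ≠ ' ' then (st.1, idx, st.2.2 + 1) else st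
  else
    if c = ' ' then (st.1 ++ [(st.2.1, st.2.2)], -1, 0) else (st.1, st.2.1, st.2.2 + 1)

-- A's trailing 'if current_index != -1: words.append(...)'
def pvFinalize (s : List (Int × Int) × Int × Int) : List (Int × Int) :=
  if s.2.1 ≠ -1 then s.1 ++ [(s.2.1, s.2.2)] else s.1

-- the return_packet comprehension (identical in A and in B)
def pvPacket (annotation_id : String) (category : String) (words : List (Int × Int)) :
    List (String × (String × Int × Int)) :=
  (PySem.List.enumerate words).map
    (fun iw => (annotation_id ++ "-" ++ PySem.Int.toStr iw.1, (category, iw.2.1, iw.2.2)))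

def split_annotations (annotation_id : String) (category : String) (offset : Int) (annotation_length : Int) (text : String) : List (String × (String × Int × Int)) :=
  pvPacket annotation_id category
    (pvFinalize ((PySem.List.pyRange offset (offset + annotation_length) 1).foldl
      (pvStepA text) ([], -1, 0)))

-- ===== PORT B =====
-- Source B's inner 'while j < n and span[j] != ' ': j += 1'.  The while loops are ported with a
-- structural fuel counter: the inner loop runs at most span.length steps and the outer one at
-- most span.length + 1 (i strictly increases), so the fuel supplied below is never exhausted.
def pvBInner (span : List Char) : Nat → Nat → Nat
  | 0, j => j
  | fuel + 1, j =>
    if j < span.length ∧ span.getD j ' ' ≠ ' ' then pvBInner span fuel (j + 1) else j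

-- Source B's outer 'while i < n' two-pointer loop
def pvBOuter (span : List Char) (offset : Int) : Nat → Nat → List (Int × Int)
  | 0, _ => []
  | fuel + 1, i =>
    if i < span.length then
      if span.getD i ' ' = ' ' then pvBOuter span offset fuel (i + 1)
      else
        (offset + (i : Int), ((pvBInner span span.length i - i : Nat) : Int)) ::
          pvBOuter span offset fuel (pvBInner span span.length i)
    else []

-- run the outer loop from i = 0 with its (sufficient) fuel
def pvBOuterRun (span : List Char) (offset : Int) : List (Int × Int) :=
  pvBOuter span offset (span.length + 1) 0

def split_annotations_alt (annotation_id : String) (category : String) (offset : Int) (annotation_length : Int) (text : String) : List (String × (String × Int × Int)) :=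
  pvPacket annotation_id category
    (pvBOuterRun ((PySem.List.pyRange offset (offset + annotation_length) 1).map (pvChr text))
      offset)

-- ===== PRECONDITION & SPEC =====
-- Pre_ excludes exactly the inputs where Python A raises IndexError (an index of
-- range(offset, offset+annotation_length) outside text), and in addition all negative
-- offsets: those are outside the natural domain of a document annotation — there Python's
-- negative-index wraparound collides with A's current_index = -1 sentinel.
def Pre_split_annotations (annotation_id : String) (category : String) (offset : Int) (annotation_length : Int) (text : String) : Prop :=
  annotation_length ≤ 0 ∨ (0 ≤ offset ∧ offset + annotation_length ≤ PySem.Str.len text)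
instance (annotation_id : String) (category : String) (offset : Int) (annotation_length : Int) (text : String) : Decidable (Pre_split_annotations annotation_id category offset annotation_length text) := by unfold Pre_split_annotations; infer_instance

def pvWitness_split_annotations : String × String × Int × Int × String := ("a1", "Drug", 1, 4, "ab cd e")

def Spec_split_annotations (annotation_id : String) (category : String) (offset : Int) (annotation_length : Int) (text : String) (out : List (String × (String × Int × Int))) : Prop := out = split_annotations_alt annotation_id category offset annotation_length text
instance (annotation_id : String) (category : String) (offset : Int) (annotation_length : Int) (text : String) (out : List (String × (String × Int × Int))) : Decidable (Spec_split_annotations annotation_id category offset annotation_length text out) := by unfold Spec_split_annotations; infer_instance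

-- ===== CLAIM (what is proved, stated in full; the proofs are below) =====
def Claim_equal_split_annotations : Prop := ∀ (annotation_id : String) (category : String) (offset : Int) (annotation_length : Int) (text : String), Dom_split_annotations annotation_id category offset annotation_length text → Pre_split_annotations annotation_id category offset annotation_length text → Spec_split_annotations annotation_id category offset annotation_length text (split_annotations annotation_id category offset annotation_length text)

-- ===== LEMMAS AND PROOFS =====

-- basic facts about the fuelled B-side loops
theorem pvBInner_stop {span : List Char} {j : Nat}
    (h : ¬ (j < span.length ∧ span.getD j ' ' ≠ ' ')) :
    ∀ fuel : Nat, pvBInner span fuel j = j := by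
  intro fuel; cases fuel with
  | zero => rfl
  | succ f => rw [pvBInner]; rw [if_neg h]

theorem pvBInner_ge (span : List Char) : ∀ (fuel j : Nat), j ≤ pvBInner span fuel j := by
  intro fuel
  induction fuel with
  | zero => intro j; simp [pvBInner]
  | succ f ih =>
    intro j
    rw [pvBInner]
    by_cases h : j < span.length ∧ span.getD j ' ' ≠ ' '
    · rw [if_pos h]; exact (ih (j + 1)).trans' (by omega)
    · rw [if_neg h]

theorem pvBInner_fuel (span : List Char) : ∀ (f1 f2 j : Nat),
    span.length - j ≤ f1 → span.length - j ≤ f2 →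
    pvBInner span f1 j = pvBInner span f2 j := by
  intro f1
  induction f1 with
  | zero =>
    intro f2 j h1 h2
    have h : ¬ (j < span.length ∧ span.getD j ' ' ≠ ' ') := fun hc => by omega
    rw [pvBInner_stop h 0, pvBInner_stop h f2]
  | succ f ih =>
    intro f2 j h1 h2
    by_cases h : j < span.length ∧ span.getD j ' ' ≠ ' '
    · obtain ⟨g, rfl⟩ : ∃ g, f2 = g + 1 := ⟨f2 - 1, by omega⟩
      rw [pvBInner, pvBInner, if_pos h, if_pos h]
      exact ih g (j + 1) (by omega) (by omega)
    · rw [pvBInner_stop h (f + 1), pvBInner_stop h f2]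

theorem pvBOuter_stop {span : List Char} {offset : Int} {i : Nat}
    (h : ¬ i < span.length) : ∀ fuel : Nat, pvBOuter span offset fuel i = [] := by
  intro fuel; cases fuel with
  | zero => rfl
  | succ f => rw [pvBOuter]; rw [if_neg h]

theorem pvBOuter_space {span : List Char} {offset : Int} {i fuel : Nat}
    (h : i < span.length) (hc : span.getD i ' ' = ' ') :
    pvBOuter span offset (fuel + 1) i = pvBOuter span offset fuel (i + 1) := by
  rw [pvBOuter]; rw [if_pos h]; rw [if_pos hc]

theorem pvBOuter_word {span : List Char} {offset : Int} {i fuel : Nat}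
    (h : i < span.length) (hc : span.getD i ' ' ≠ ' ') :
    pvBOuter span offset (fuel + 1) i =
      (offset + (i : Int), ((pvBInner span span.length i - i : Nat) : Int)) ::
        pvBOuter span offset fuel (pvBInner span span.length i) := by
  rw [pvBOuter]; rw [if_pos h]; rw [if_neg hc]

-- Main invariant: from position i, A's remaining fold (in either state) produces exactly
-- B's remaining runs.  (1) state 'outside a word' (ci = -1), (2) state 'inside a word'.
theorem pvMain (text : String) (offset : Int) (span : List Char)
    (hoff : 0 ≤ offset)
    (H : ∀ k : Nat, k < span.length → span.getD k ' ' = pvChr text (offset + k)) :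
    ∀ (m i : Nat), span.length - i = m → i ≤ span.length →
      (∀ (fuel : Nat) (words : List (Int × Int)), span.length - i < fuel →
        pvFinalize ((PySem.List.pyRange (offset + i) (offset + span.length) 1).foldl
            (pvStepA text) (words, -1, 0)) = words ++ pvBOuter span offset fuel i)
      ∧ (∀ (fuel : Nat) (words : List (Int × Int)) (ci len : Int),
          0 ≤ ci → span.length - i < fuel →
        pvFinalize ((PySem.List.pyRange (offset + i) (offset + span.length) 1).foldl
            (pvStepA text) (words, ci, len)) =
          words ++ (ci, len + ((pvBInner span span.length i - i : Nat) : Int)) ::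
            pvBOuter span offset fuel (pvBInner span span.length i)) := by
  intro m
  induction m with
  | zero =>
    intro i hm hle
    have hi : i = span.length := by omega
    subst hi
    have hnil : PySem.List.pyRange (offset + span.length) (offset + span.length) 1 = [] :=
      PySem.List.pyRange_one_eq_nil le_rfl
    have hbi : ∀ fuel : Nat, pvBInner span fuel span.length = span.length :=
      pvBInner_stop (by omega)
    have hbo : ∀ fuel : Nat, pvBOuter span offset fuel span.length = [] :=
      pvBOuter_stop (by omega)
    refine ⟨?_, ?_⟩
    · intro fuel words _; simp [hnil, pvFinalize, hbo]
    · intro fuel words ci len hci _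
      have hne : ¬ ci = -1 := by omega
      simp [hnil, pvFinalize, hbi, hbo, hne]
  | succ m ih =>
    intro i hm hle
    have hi : i < span.length := by omega
    have hcons : PySem.List.pyRange (offset + i) (offset + span.length) 1 =
        (offset + i) :: PySem.List.pyRange (offset + i + 1) (offset + span.length) 1 :=
      PySem.List.pyRange_one_cons (by omega)
    have hshift : offset + i + 1 = offset + ((i + 1 : Nat) : Int) := by push_cast; ring
    have hchr : pvChr text (offset + i) = span.getD i ' ' := (H i hi).symm
    have ih1 := (ih (i + 1) (by omega) (by omega)).1
    have ih2 := (ih (i + 1) (by omega) (by omega)).2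
    by_cases hc : span.getD i ' ' = ' '
    · -- current char is a space
      have hcc : pvChr text (offset + (i : Int)) = ' ' := by rw [hchr]; exact hc
      refine ⟨?_, ?_⟩
      · intro fuel words hfuel
        obtain ⟨f, rfl⟩ : ∃ f, fuel = f + 1 := ⟨fuel - 1, by omega⟩
        rw [hcons, List.foldl_cons]
        have hstep : pvStepA text (words, -1, 0) (offset + i) = (words, -1, 0) := by
          simp [pvStepA, hcc]
        rw [hstep, hshift, ih1 f words (by omega), pvBOuter_space hi hc]
      · intro fuel words ci len hci hfuel
        obtain ⟨f, rfl⟩ : ∃ f, fuel = f + 1 := ⟨fuel - 1, by omega⟩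
        rw [hcons, List.foldl_cons]
        have hne : ¬ ci = -1 := by omega
        have hstep : pvStepA text (words, ci, len) (offset + i) =
            (words ++ [(ci, len)], -1, 0) := by
          simp [pvStepA, hcc, hne]
        rw [hstep, hshift, ih1 f (words ++ [(ci, len)]) (by omega)]
        have hbi : pvBInner span span.length i = i := pvBInner_stop (fun h => h.2 hc) _
        rw [hbi, pvBOuter_space hi hc]
        simp
    · -- current char is not a space
      have hcc : ¬ pvChr text (offset + (i : Int)) = ' ' := by rw [hchr]; exact hc
      have hbi : pvBInner span span.length i = pvBInner span span.length (i + 1) := by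
        obtain ⟨g, hg⟩ : ∃ g, span.length = g + 1 := ⟨span.length - 1, by omega⟩
        calc pvBInner span span.length i = pvBInner span g (i + 1) := by
              conv_lhs => rw [hg]
              rw [pvBInner]; rw [if_pos ⟨hi, hc⟩]
          _ = pvBInner span span.length (i + 1) :=
              pvBInner_fuel span g span.length (i + 1) (by omega) (by omega)
      have hge : i + 1 ≤ pvBInner span span.length (i + 1) := pvBInner_ge span _ _
      refine ⟨?_, ?_⟩
      · intro fuel words hfuel
        obtain ⟨f, rfl⟩ : ∃ f, fuel = f + 1 := ⟨fuel - 1, by omega⟩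
        rw [hcons, List.foldl_cons]
        have hstep : pvStepA text (words, -1, 0) (offset + i) = (words, offset + i, 1) := by
          simp [pvStepA, hcc]
        rw [hstep, hshift, ih2 f words (offset + i) 1 (by omega) (by omega)]
        rw [pvBOuter_word hi hc, hbi]
        rw [show (1 : Int) + ((pvBInner span span.length (i + 1) - (i + 1) : Nat) : Int) =
              ((pvBInner span span.length (i + 1) - i : Nat) : Int) from by omega]
      · intro fuel words ci len hci hfuel
        rw [hcons, List.foldl_cons]
        have hne : ¬ ci = -1 := by omega
        have hstep : pvStepA text (words, ci, len) (offset + i) = (words, ci, len + 1) := by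
          simp [pvStepA, hcc, hne]
        rw [hstep, hshift, ih2 fuel words ci (len + 1) hci (by omega), hbi]
        rw [show len + 1 + ((pvBInner span span.length (i + 1) - (i + 1) : Nat) : Int) =
              len + ((pvBInner span span.length (i + 1) - i : Nat) : Int) from by omega]

-- the span's characters are exactly pvChr text (offset + k)
theorem pvSpanGetD (text : String) (offset L : Int) (k : Nat)
    (hk : k < ((PySem.List.pyRange offset (offset + L) 1).map (pvChr text)).length) :
    ((PySem.List.pyRange offset (offset + L) 1).map (pvChr text)).getD k ' ' =
      pvChr text (offset + k) := by
  have hk' : k < (PySem.List.pyRange offset (offset + L) 1).length := by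
    simpa using hk
  rw [List.getD_eq_getElem?_getD, List.getElem?_map, PySem.List.getElem?_pyRange_one]
  rw [PySem.List.length_pyRange_one] at hk'
  have hkL : (k : Int) < L := by omega
  simp [hkL]

-- ===== VERDICT (by name: the statement is the Claim_ definition above) =====
theorem split_annotations_spec : Claim_equal_split_annotations := by
  intro annotation_id category offset L text _hdom hpre
  unfold Spec_split_annotations split_annotations split_annotations_alt pvBOuterRun
  by_cases hL : L ≤ 0
  · have hnil : PySem.List.pyRange offset (offset + L) 1 = [] :=
      PySem.List.pyRange_one_eq_nil (by omega)
    rw [hnil]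
    simp [pvFinalize, pvBOuter, pvBInner]
  · have hoff : 0 ≤ offset ∧ offset + L ≤ PySem.Str.len text := by
      rcases hpre with h | h
      · omega
      · exact h
    set span := (PySem.List.pyRange offset (offset + L) 1).map (pvChr text) with hspan
    have hlen : (span.length : Int) = L := by
      rw [hspan]; simp [PySem.List.length_pyRange_one]; omega
    have H : ∀ k : Nat, k < span.length → span.getD k ' ' = pvChr text (offset + k) := by
      intro k hk; exact pvSpanGetD text offset L k hk
    have := (pvMain text offset span hoff.1 H span.length 0 (by omega) (by omega)).1
      (span.length + 1) [] (by omega)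
    rw [show offset + (0 : Nat) = offset by simp,
        show offset + (span.length : Int) = offset + L by omega] at this
    rw [this]
    simp
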